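-- pv_equiv track=rewrite | github.com/JWeel/Sjoemel | py3.py | growStems
-- ===== SOURCE A (Python) =====
-- def growStems(seed_data, pixel_field):
--     seed_x = seed_data[0]
--     seed_y = seed_data[1]
--     width = seed_data[2]
--     height = seed_data[3]
--     for x in range(seed_x, seed_x+width):
--         for y in range(seed_y-height, seed_y):
--             pixel_field[x][y] = (0, 0, 0)
--             #Dithering
--             if seed_y > 300 and seed_y < 320:
--                 if (x+y)%2==0:
--                     pixel_field[x][y] = (255, 255, 255)
--             elif seed_y >= 320 and seed_y < 340:
--                 if (x+y)%4==0:
--                     pixel_field[x][y] = (255, 255, 255)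
--             elif seed_y >= 340 and seed_y < 360:
--                 if (x+y)%8==0:
--                     pixel_field[x][y] = (255, 255, 255)
--
--     return pixel_field
-- ===== SOURCE B (Python) =====
-- def growStems(seed_data, pixel_field):
--     seed_x, seed_y, width, height = seed_data
--
--     def color(x, y):
--         if 300 < seed_y < 320 and (x + y) % 2 == 0:
--             return (255, 255, 255)
--         if 320 <= seed_y < 340 and (x + y) % 4 == 0:
--             return (255, 255, 255)
--         if 340 <= seed_y < 360 and (x + y) % 8 == 0:
--             return (255, 255, 255)
--         return (0, 0, 0)
--
--     for x, row in enumerate(pixel_field):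
--         if seed_x <= x < seed_x + width:
--             pixel_field[x] = [color(x, y) if seed_y - height <= y < seed_y else px
--                               for y, px in enumerate(row)]
--     return pixel_field
-- ===== Notes on version B (the rewrite author's own statement) =====
-- stated objective: alternative
-- what changed: A iterates over index ranges and mutates each cell twice (paint black, then conditionally repaint white) with the dither branch re-tested per pixel; B instead traverses the pixel data itself with enumerate, computing each cell's final colour exactly once via a pure per-cell colour function and rebuilding affected rows by comprehension.
-- outside the precondition, e.g. on growStems((1, 1, 1, 1), [[(1, 1, 1)]]): A raises IndexError, B returns [[(1, 1, 1)]]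
import Mathlib
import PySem

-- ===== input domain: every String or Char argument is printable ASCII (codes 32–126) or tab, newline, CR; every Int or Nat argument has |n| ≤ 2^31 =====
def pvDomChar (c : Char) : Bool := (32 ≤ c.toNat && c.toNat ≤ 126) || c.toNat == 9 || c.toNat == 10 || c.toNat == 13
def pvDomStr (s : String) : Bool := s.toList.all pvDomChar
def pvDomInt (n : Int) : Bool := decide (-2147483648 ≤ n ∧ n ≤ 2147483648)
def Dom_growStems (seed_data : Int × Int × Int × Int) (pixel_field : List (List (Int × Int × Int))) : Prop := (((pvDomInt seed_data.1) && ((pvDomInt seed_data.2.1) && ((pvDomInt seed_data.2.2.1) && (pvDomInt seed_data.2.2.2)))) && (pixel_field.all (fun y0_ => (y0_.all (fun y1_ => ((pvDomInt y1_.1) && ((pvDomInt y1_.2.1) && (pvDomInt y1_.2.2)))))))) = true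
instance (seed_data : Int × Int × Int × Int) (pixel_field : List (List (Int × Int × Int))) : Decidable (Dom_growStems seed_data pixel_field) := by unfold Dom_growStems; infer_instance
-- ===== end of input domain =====

-- A paints the rectangle by iterating over index ranges, writing every cell black and then conditionally
-- repainting it white; B traverses the pixel_field data itself (enumerate) and computes each cell's final
-- colour ONCE with a pure per-cell colour function, rebuilding rows by comprehension (objective: alternative).
-- In Python A mutates cells in place while B rebinds whole rows to fresh lists; the equivalence proved
-- here is about the (identical) returned field.

-- ===== PORT A =====
-- pixel_field[x][y] = v  (Python subscript assignment; negative-index semantics via PySem)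
def pySetCell (f : List (List (Int × Int × Int))) (x y : Int) (v : Int × Int × Int) : List (List (Int × Int × Int)) :=
  PySem.List.pySetD f x (PySem.List.pySetD (PySem.List.pyGetD f x []) y v)

def growStems (seed_data : Int × Int × Int × Int) (pixel_field : List (List (Int × Int × Int))) : List (List (Int × Int × Int)) :=
  let seed_x := seed_data.1
  let seed_y := seed_data.2.1
  let width := seed_data.2.2.1
  let height := seed_data.2.2.2
  (PySem.List.pyRange seed_x (seed_x + width)).foldl (fun fl x =>
    (PySem.List.pyRange (seed_y - height) seed_y).foldl (fun fl y =>
      let fl := pySetCell fl x y (0, 0, 0)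
      if seed_y > 300 ∧ seed_y < 320 then
        if PySem.Int.mod (x + y) 2 = 0 then pySetCell fl x y (255, 255, 255) else fl
      else if 320 ≤ seed_y ∧ seed_y < 340 then
        if PySem.Int.mod (x + y) 4 = 0 then pySetCell fl x y (255, 255, 255) else fl
      else if 340 ≤ seed_y ∧ seed_y < 360 then
        if PySem.Int.mod (x + y) 8 = 0 then pySetCell fl x y (255, 255, 255) else fl
      else fl) fl) pixel_field

-- ===== PORT B =====
-- Source B's nested helper color(x, y)
def ditherColor (sy x y : Int) : Int × Int × Int :=
  if (300 < sy ∧ sy < 320) ∧ PySem.Int.mod (x + y) 2 = 0 then (255, 255, 255)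
  else if (320 ≤ sy ∧ sy < 340) ∧ PySem.Int.mod (x + y) 4 = 0 then (255, 255, 255)
  else if (340 ≤ sy ∧ sy < 360) ∧ PySem.Int.mod (x + y) 8 = 0 then (255, 255, 255)
  else (0, 0, 0)

def growStems_alt (seed_data : Int × Int × Int × Int) (pixel_field : List (List (Int × Int × Int))) : List (List (Int × Int × Int)) :=
  let seed_x := seed_data.1
  let seed_y := seed_data.2.1
  let width := seed_data.2.2.1
  let height := seed_data.2.2.2
  (PySem.List.enumerate pixel_field).map (fun p =>
    if seed_x ≤ p.1 ∧ p.1 < seed_x + width then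
      (PySem.List.enumerate p.2).map (fun q =>
        if seed_y - height ≤ q.1 ∧ q.1 < seed_y then ditherColor seed_y p.1 q.1 else q.2)
    else p.2)

-- ===== PRECONDITION & SPEC =====
-- Pre_ excludes (a) inputs where a touched index is ≥ the list length, on which the Python A raises IndexError,
-- and (b) inputs with a negative touched index, on which A returns but Python's silent negative-index wraparound
-- fills cells at the opposite edge of the field — an accident of indexing no caller of a pixel fill relies on.
def Pre_growStems (seed_data : Int × Int × Int × Int) (pixel_field : List (List (Int × Int × Int))) : Prop :=
  seed_data.2.2.1 ≤ 0 ∨ seed_data.2.2.2 ≤ 0 ∨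
    (0 ≤ seed_data.1 ∧ seed_data.1 + seed_data.2.2.1 ≤ (pixel_field.length : Int) ∧
     0 ≤ seed_data.2.1 - seed_data.2.2.2 ∧
     ∀ row ∈ (pixel_field.drop seed_data.1.toNat).take seed_data.2.2.1.toNat,
       seed_data.2.1 ≤ (row.length : Int))
instance (seed_data : Int × Int × Int × Int) (pixel_field : List (List (Int × Int × Int))) : Decidable (Pre_growStems seed_data pixel_field) := by unfold Pre_growStems; infer_instance

def pvWitness_growStems : (Int × Int × Int × Int) × (List (List (Int × Int × Int))) :=
  ((0, 2, 1, 2), [[(1, 1, 1), (1, 1, 1)]])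

def Spec_growStems (seed_data : Int × Int × Int × Int) (pixel_field : List (List (Int × Int × Int))) (out : List (List (Int × Int × Int))) : Prop := out = growStems_alt seed_data pixel_field
instance (seed_data : Int × Int × Int × Int) (pixel_field : List (List (Int × Int × Int))) (out : List (List (Int × Int × Int))) : Decidable (Spec_growStems seed_data pixel_field out) := by unfold Spec_growStems; infer_instance

-- ===== CLAIM (what is proved, stated in full; the proofs are below) =====
def Claim_equal_growStems : Prop := ∀ (seed_data : Int × Int × Int × Int) (pixel_field : List (List (Int × Int × Int))), Dom_growStems seed_data pixel_field → Pre_growStems seed_data pixel_field → Spec_growStems seed_data pixel_field (growStems seed_data pixel_field)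

-- ===== LEMMAS AND PROOFS =====

-- Proof-side normal form of pySetCell at nonnegative coordinates: a cell write at Nat coordinates.
def S (f : List (List (Int × Int × Int))) (i j : Nat) (v : Int × Int × Int) : List (List (Int × Int × Int)) :=
  f.set i ((f[i]?.getD []).set j v)

lemma pySetCell_eq (f : List (List (Int × Int × Int))) {x y : Int} (v : Int × Int × Int)
    (hx : 0 ≤ x) (hy : 0 ≤ y) : pySetCell f x y v = S f x.toNat y.toNat v := by
  simp [pySetCell, S, PySem.List.pySetD_of_nonneg, PySem.List.pyGetD_of_nonneg, hx, hy,
    List.getD_eq_getElem?_getD]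

lemma getD_set_self (f : List (List (Int × Int × Int))) (i : Nat) (r : List (Int × Int × Int))
    (h : i < f.length) : ((f.set i r)[i]?.getD []) = r := by
  simp [List.getElem?_set_self', List.getElem?_eq_getElem h]

lemma S_collapse (f : List (List (Int × Int × Int))) (i j : Nat) (v v' : Int × Int × Int) :
    S (S f i j v) i j v' = S f i j v' := by
  by_cases h : i < f.length
  · simp only [S, getD_set_self _ _ _ h, List.set_set]
  · rw [Nat.not_lt] at h
    simp [S, List.set_eq_of_length_le h, List.getElem?_eq_none h]

-- A's inner loop over one row, in row form: the whole fold is one row update.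
lemma inner_fold (i : Nat) (v : Nat → Int × Int × Int) :
    ∀ (ys : List Nat) (f : List (List (Int × Int × Int))),
    ys.foldl (fun fl j => S fl i j (v j)) f
      = f.set i (ys.foldl (fun r j => r.set j (v j)) (f[i]?.getD [])) := by
  intro ys
  induction ys with
  | nil =>
    intro f
    simp only [List.foldl_nil]
    by_cases h : i < f.length
    · rw [List.getElem?_eq_getElem h]; simp
    · rw [Nat.not_lt] at h
      rw [List.set_eq_of_length_le h]
  | cons j t ih =>
    intro f
    simp only [List.foldl_cons]
    rw [ih]
    have hgd : (S f i j (v j))[i]?.getD [] = (f[i]?.getD []).set j (v j) := by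
      by_cases h : i < f.length
      · exact getD_set_self _ _ _ h
      · rw [Nat.not_lt] at h
        simp [S, List.set_eq_of_length_le h, List.getElem?_eq_none h]
    rw [hgd]
    simp only [S, List.set_set]

-- Pointwise value of a fold of set-updates at pairwise distinct indices.
lemma foldl_set_get {X : Type} (c : Nat → X) :
    ∀ (ys : List Nat), ys.Nodup → ∀ (r : List X) (m : Nat),
    (ys.foldl (fun r j => r.set j (c j)) r)[m]?
      = if m ∈ ys then r[m]?.map (fun _ => c m) else r[m]? := by
  intro ys
  induction ys with
  | nil => intro _ r m; simp
  | cons j t ih =>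
    intro hnd r m
    obtain ⟨hj, ht⟩ := List.nodup_cons.mp hnd
    simp only [List.foldl_cons]
    rw [ih ht]
    by_cases hm : m = j
    · subst hm
      rw [if_neg hj, if_pos (List.mem_cons_self)]
      by_cases h : m < r.length
      · rw [List.getElem?_set_self' , List.getElem?_eq_getElem h]; rfl
      · rw [Nat.not_lt] at h
        rw [List.set_eq_of_length_le h, List.getElem?_eq_none h]; rfl
    · rw [List.getElem?_set_ne (fun hc => hm hc.symm)]
      simp [List.mem_cons, hm]

-- Pointwise value of a fold of whole-row updates at pairwise distinct row indices.
lemma foldl_rowupd_get (g : Nat → List (Int × Int × Int) → List (Int × Int × Int)) :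
    ∀ (xs : List Nat), xs.Nodup → ∀ (f : List (List (Int × Int × Int))) (n : Nat),
    (xs.foldl (fun fl i => fl.set i (g i (fl[i]?.getD []))) f)[n]?
      = if n ∈ xs then f[n]?.map (g n) else f[n]? := by
  intro xs
  induction xs with
  | nil => intro _ f n; simp
  | cons i t ih =>
    intro hnd f n
    obtain ⟨hi, ht⟩ := List.nodup_cons.mp hnd
    simp only [List.foldl_cons]
    rw [ih ht]
    by_cases hn : n = i
    · subst hn
      rw [if_neg hi, if_pos (List.mem_cons_self)]
      by_cases h : n < f.length
      · rw [List.getElem?_set_self', List.getElem?_eq_getElem h]; rfl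
      · rw [Nat.not_lt] at h
        rw [List.set_eq_of_length_le h, List.getElem?_eq_none h]; rfl
    · rw [List.getElem?_set_ne (fun hc => hn hc.symm)]
      simp [List.mem_cons, hn]

-- Specialization of foldl_rowupd_get to the inner-fold row update (first-order form for rw).
lemma foldl_rowupd_get' (ysN : List Nat) (v : Int → Int → Int × Int × Int)
    (xs : List Nat) (hnd : xs.Nodup) (f : List (List (Int × Int × Int))) (n : Nat) :
    (xs.foldl (fun fl i =>
        fl.set i (ysN.foldl (fun r (j : Nat) => r.set j (v (i : Int) (j : Int))) (fl[i]?.getD []))) f)[n]?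
      = if n ∈ xs then f[n]?.map (fun r => ysN.foldl (fun r (j : Nat) => r.set j (v (n : Int) (j : Int))) r) else f[n]? :=
  foldl_rowupd_get (fun i r => ysN.foldl (fun r (j : Nat) => r.set j (v (i : Int) (j : Int))) r) xs hnd f n

lemma mem_map_toNat_range (a b : Int) (h0 : 0 ≤ a) (n : Nat) :
    n ∈ (PySem.List.pyRange a b).map Int.toNat ↔ a ≤ (n : Int) ∧ (n : Int) < b := by
  simp only [List.mem_map, PySem.List.mem_pyRange_one]
  constructor
  · rintro ⟨x, ⟨hax, hxb⟩, hx⟩; omega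
  · intro h; exact ⟨(n : Int), ⟨h.1, h.2⟩, Int.toNat_natCast n⟩

lemma nodup_map_toNat_range (a b : Int) (h0 : 0 ≤ a) :
    ((PySem.List.pyRange a b).map Int.toNat).Nodup :=
  List.Nodup.map_on
    (fun x hx y hy hEq => by
      have h1 := (PySem.List.mem_pyRange_one.mp hx).1
      have h2 := (PySem.List.mem_pyRange_one.mp hy).1
      omega)
    (PySem.List.nodup_pyRange_one _ _)

-- Core: a nested range fold of single cell writes equals B's enumerate-and-rebuild traversal.
lemma main_pointwise (sx sy w h : Int) (hsx : 0 ≤ sx) (hsyh : 0 ≤ sy - h)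
    (v : Int → Int → Int × Int × Int) (f : List (List (Int × Int × Int))) :
    (PySem.List.pyRange sx (sx + w)).foldl (fun fl x =>
        (PySem.List.pyRange (sy - h) sy).foldl (fun fl y => pySetCell fl x y (v x y)) fl) f
      = (PySem.List.enumerate f).map (fun p =>
          if sx ≤ p.1 ∧ p.1 < sx + w then
            (PySem.List.enumerate p.2).map (fun q =>
              if sy - h ≤ q.1 ∧ q.1 < sy then v p.1 q.1 else q.2)
          else p.2) := by
  have hX : ∀ x ∈ PySem.List.pyRange sx (sx + w), (0 : Int) ≤ x :=
    fun x hx => le_trans hsx (PySem.List.mem_pyRange_one.mp hx).1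
  have hY : ∀ y ∈ PySem.List.pyRange (sy - h) sy, (0 : Int) ≤ y :=
    fun y hy => le_trans hsyh (PySem.List.mem_pyRange_one.mp hy).1
  -- step 1: the Int-range fold as a Nat fold of whole-row updates
  have h1 : (PySem.List.pyRange sx (sx + w)).foldl (fun fl x =>
        (PySem.List.pyRange (sy - h) sy).foldl (fun fl y => pySetCell fl x y (v x y)) fl) f
      = ((PySem.List.pyRange sx (sx + w)).map Int.toNat).foldl (fun fl (i : Nat) =>
          fl.set i ((((PySem.List.pyRange (sy - h) sy).map Int.toNat)).foldl
            (fun r (j : Nat) => r.set j (v (i : Int) (j : Int))) (fl[i]?.getD []))) f := by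
    symm
    calc ((PySem.List.pyRange sx (sx + w)).map Int.toNat).foldl (fun fl (i : Nat) =>
          fl.set i ((((PySem.List.pyRange (sy - h) sy).map Int.toNat)).foldl
            (fun r (j : Nat) => r.set j (v (i : Int) (j : Int))) (fl[i]?.getD []))) f
        = ((PySem.List.pyRange sx (sx + w)).map Int.toNat).foldl (fun fl (i : Nat) =>
            (((PySem.List.pyRange (sy - h) sy).map Int.toNat)).foldl
              (fun fl (j : Nat) => S fl i j (v (i : Int) (j : Int))) fl) f := by
          refine PySem.List.foldl_congr_mem _ _ _ _ ?_
          intro acc i _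
          rw [inner_fold]
      _ = _ := by
          simp only [List.foldl_map]
          refine PySem.List.foldl_congr_mem _ _ _ _ ?_
          intro acc x hx
          refine PySem.List.foldl_congr_mem _ _ _ _ ?_
          intro acc' y hy
          have hx0 := hX x hx
          have hy0 := hY y hy
          rw [Int.toNat_of_nonneg hx0, Int.toNat_of_nonneg hy0,
            pySetCell_eq _ _ hx0 hy0]
  rw [h1]
  apply List.ext_getElem?
  intro n
  rw [foldl_rowupd_get' _ v _ (nodup_map_toNat_range _ _ hsx),
    List.getElem?_map, PySem.List.getElem?_enumerate]
  simp only [mem_map_toNat_range _ _ hsx]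
  by_cases hc : sx ≤ (n : Int) ∧ (n : Int) < sx + w
  · rw [if_pos hc]
    cases hf : f[n]? with
    | none => rfl
    | some row =>
      simp only [Option.map_some]
      rw [if_pos (by simpa using hc)]
      congr 1
      apply List.ext_getElem?
      intro m
      rw [foldl_set_get _ _ (nodup_map_toNat_range _ _ hsyh),
        List.getElem?_map, PySem.List.getElem?_enumerate]
      simp only [mem_map_toNat_range _ _ hsyh]
      by_cases hd : sy - h ≤ (m : Int) ∧ (m : Int) < sy
      · rw [if_pos hd]
        cases row[m]? with
        | none => rfl
        | some px =>
          simp only [Option.map_some]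
          rw [if_pos (by simpa using hd)]
          simp
      · rw [if_neg hd]
        cases row[m]? with
        | none => rfl
        | some px =>
          simp only [Option.map_some]
          rw [if_neg (by simpa using hd)]
  · rw [if_neg hc]
    cases f[n]? with
    | none => rfl
    | some row =>
      simp only [Option.map_some]
      rw [if_neg (by simpa using hc)]

-- ===== VERDICT (by name: the statement is the Claim_ definition above) =====
theorem growStems_spec : Claim_equal_growStems := by
  unfold Claim_equal_growStems
  rintro ⟨sx, sy, w, h⟩ pf _hDom hPre
  unfold Pre_growStems at hPre
  dsimp only at hPre
  unfold Spec_growStems growStems growStems_alt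
  dsimp only
  rcases hPre with hw | hh | ⟨hsx, _hlen, hsyh, _hrows⟩
  · -- width ≤ 0: A's outer range is empty; B's row condition never holds
    rw [show PySem.List.pyRange sx (sx + w) = [] from PySem.List.pyRange_one_eq_nil (by omega)]
    simp only [List.foldl_nil]
    symm
    calc (PySem.List.enumerate pf).map (fun p =>
          if sx ≤ p.1 ∧ p.1 < sx + w then
            (PySem.List.enumerate p.2).map (fun q =>
              if sy - h ≤ q.1 ∧ q.1 < sy then ditherColor sy p.1 q.1 else q.2)
          else p.2)
        = (PySem.List.enumerate pf).map (fun p => p.2) := by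
          refine List.map_congr_left ?_
          intro p _
          exact if_neg (by omega)
      _ = pf := PySem.List.map_snd_enumerate _ _
  · -- height ≤ 0: A's inner range is empty; B's cell condition never holds
    rw [show PySem.List.pyRange (sy - h) sy = [] from PySem.List.pyRange_one_eq_nil (by omega)]
    simp only [List.foldl_nil, PySem.List.foldl_ignore]
    symm
    calc (PySem.List.enumerate pf).map (fun p =>
          if sx ≤ p.1 ∧ p.1 < sx + w then
            (PySem.List.enumerate p.2).map (fun q =>
              if sy - h ≤ q.1 ∧ q.1 < sy then ditherColor sy p.1 q.1 else q.2)
          else p.2)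
        = (PySem.List.enumerate pf).map (fun p => p.2) := by
          refine List.map_congr_left ?_
          intro p _
          by_cases hc : sx ≤ p.1 ∧ p.1 < sx + w
          · rw [if_pos hc,
              List.map_congr_left (fun q _ => if_neg (by omega)),
              PySem.List.map_snd_enumerate]
          · rw [if_neg hc]
      _ = pf := PySem.List.map_snd_enumerate _ _
  · -- main rectangle case
    by_cases c1 : 300 < sy ∧ sy < 320
    · have hcol : ∀ x y : Int, ditherColor sy x y
          = if PySem.Int.mod (x + y) 2 = 0 then ((255 : Int), (255 : Int), (255 : Int)) else (0, 0, 0) := by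
        intro x y
        unfold ditherColor
        by_cases hm : PySem.Int.mod (x + y) 2 = 0
        · rw [if_pos ⟨c1, hm⟩, if_pos hm]
        · rw [if_neg (fun hc => hm hc.2), if_neg (fun hc => (by omega : ¬ (320 ≤ sy ∧ sy < 340)) hc.1),
            if_neg (fun hc => (by omega : ¬ (340 ≤ sy ∧ sy < 360)) hc.1), if_neg hm]
      simp only [hcol]
      have hbody : (PySem.List.pyRange sx (sx + w)).foldl (fun fl x =>
            (PySem.List.pyRange (sy - h) sy).foldl (fun fl y =>
              let fl' := pySetCell fl x y (0, 0, 0)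
              if sy > 300 ∧ sy < 320 then
                if PySem.Int.mod (x + y) 2 = 0 then pySetCell fl' x y (255, 255, 255) else fl'
              else if 320 ≤ sy ∧ sy < 340 then
                if PySem.Int.mod (x + y) 4 = 0 then pySetCell fl' x y (255, 255, 255) else fl'
              else if 340 ≤ sy ∧ sy < 360 then
                if PySem.Int.mod (x + y) 8 = 0 then pySetCell fl' x y (255, 255, 255) else fl'
              else fl') fl) pf
          = (PySem.List.pyRange sx (sx + w)).foldl (fun fl x =>
              (PySem.List.pyRange (sy - h) sy).foldl (fun fl y =>
                pySetCell fl x y (if PySem.Int.mod (x + y) 2 = 0 then (255, 255, 255) else (0, 0, 0))) fl) pf := by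
        refine PySem.List.foldl_congr_mem _ _ _ _ ?_
        intro acc x hx
        refine PySem.List.foldl_congr_mem _ _ _ _ ?_
        intro acc' y hy
        have hx0 : (0 : Int) ≤ x := le_trans hsx (PySem.List.mem_pyRange_one.mp hx).1
        have hy0 : (0 : Int) ≤ y := le_trans hsyh (PySem.List.mem_pyRange_one.mp hy).1
        simp only [if_pos c1]
        by_cases hm : PySem.Int.mod (x + y) 2 = 0
        · rw [if_pos hm, if_pos hm, pySetCell_eq _ _ hx0 hy0, pySetCell_eq _ _ hx0 hy0,
            pySetCell_eq _ _ hx0 hy0, S_collapse]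
        · rw [if_neg hm, if_neg hm]
      rw [hbody]
      exact main_pointwise sx sy w h hsx hsyh _ pf
    · by_cases c2 : 320 ≤ sy ∧ sy < 340
      · have hcol : ∀ x y : Int, ditherColor sy x y
            = if PySem.Int.mod (x + y) 4 = 0 then ((255 : Int), (255 : Int), (255 : Int)) else (0, 0, 0) := by
          intro x y
          unfold ditherColor
          by_cases hm : PySem.Int.mod (x + y) 4 = 0
          · rw [if_neg (fun hc => c1 hc.1), if_pos ⟨c2, hm⟩, if_pos hm]
          · rw [if_neg (fun hc => c1 hc.1), if_neg (fun hc => hm hc.2),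
              if_neg (fun hc => (by omega : ¬ (340 ≤ sy ∧ sy < 360)) hc.1), if_neg hm]
        simp only [hcol]
        have hbody : (PySem.List.pyRange sx (sx + w)).foldl (fun fl x =>
              (PySem.List.pyRange (sy - h) sy).foldl (fun fl y =>
                let fl' := pySetCell fl x y (0, 0, 0)
                if sy > 300 ∧ sy < 320 then
                  if PySem.Int.mod (x + y) 2 = 0 then pySetCell fl' x y (255, 255, 255) else fl'
                else if 320 ≤ sy ∧ sy < 340 then
                  if PySem.Int.mod (x + y) 4 = 0 then pySetCell fl' x y (255, 255, 255) else fl'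
                else if 340 ≤ sy ∧ sy < 360 then
                  if PySem.Int.mod (x + y) 8 = 0 then pySetCell fl' x y (255, 255, 255) else fl'
                else fl') fl) pf
            = (PySem.List.pyRange sx (sx + w)).foldl (fun fl x =>
                (PySem.List.pyRange (sy - h) sy).foldl (fun fl y =>
                  pySetCell fl x y (if PySem.Int.mod (x + y) 4 = 0 then (255, 255, 255) else (0, 0, 0))) fl) pf := by
          refine PySem.List.foldl_congr_mem _ _ _ _ ?_
          intro acc x hx
          refine PySem.List.foldl_congr_mem _ _ _ _ ?_
          intro acc' y hy
          have hx0 : (0 : Int) ≤ x := le_trans hsx (PySem.List.mem_pyRange_one.mp hx).1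
          have hy0 : (0 : Int) ≤ y := le_trans hsyh (PySem.List.mem_pyRange_one.mp hy).1
          simp only [if_neg c1, if_pos c2]
          by_cases hm : PySem.Int.mod (x + y) 4 = 0
          · rw [if_pos hm, if_pos hm, pySetCell_eq _ _ hx0 hy0, pySetCell_eq _ _ hx0 hy0,
              pySetCell_eq _ _ hx0 hy0, S_collapse]
          · rw [if_neg hm, if_neg hm]
        rw [hbody]
        exact main_pointwise sx sy w h hsx hsyh _ pf
      · by_cases c3 : 340 ≤ sy ∧ sy < 360
        · have hcol : ∀ x y : Int, ditherColor sy x y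
              = if PySem.Int.mod (x + y) 8 = 0 then ((255 : Int), (255 : Int), (255 : Int)) else (0, 0, 0) := by
            intro x y
            unfold ditherColor
            by_cases hm : PySem.Int.mod (x + y) 8 = 0
            · rw [if_neg (fun hc => c1 hc.1), if_neg (fun hc => c2 hc.1), if_pos ⟨c3, hm⟩, if_pos hm]
            · rw [if_neg (fun hc => c1 hc.1), if_neg (fun hc => c2 hc.1),
                if_neg (fun hc => hm hc.2), if_neg hm]
          simp only [hcol]
          have hbody : (PySem.List.pyRange sx (sx + w)).foldl (fun fl x =>
                (PySem.List.pyRange (sy - h) sy).foldl (fun fl y =>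
                  let fl' := pySetCell fl x y (0, 0, 0)
                  if sy > 300 ∧ sy < 320 then
                    if PySem.Int.mod (x + y) 2 = 0 then pySetCell fl' x y (255, 255, 255) else fl'
                  else if 320 ≤ sy ∧ sy < 340 then
                    if PySem.Int.mod (x + y) 4 = 0 then pySetCell fl' x y (255, 255, 255) else fl'
                  else if 340 ≤ sy ∧ sy < 360 then
                    if PySem.Int.mod (x + y) 8 = 0 then pySetCell fl' x y (255, 255, 255) else fl'
                  else fl') fl) pf
              = (PySem.List.pyRange sx (sx + w)).foldl (fun fl x =>
                  (PySem.List.pyRange (sy - h) sy).foldl (fun fl y =>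
                    pySetCell fl x y (if PySem.Int.mod (x + y) 8 = 0 then (255, 255, 255) else (0, 0, 0))) fl) pf := by
            refine PySem.List.foldl_congr_mem _ _ _ _ ?_
            intro acc x hx
            refine PySem.List.foldl_congr_mem _ _ _ _ ?_
            intro acc' y hy
            have hx0 : (0 : Int) ≤ x := le_trans hsx (PySem.List.mem_pyRange_one.mp hx).1
            have hy0 : (0 : Int) ≤ y := le_trans hsyh (PySem.List.mem_pyRange_one.mp hy).1
            simp only [if_neg c1, if_neg c2, if_pos c3]
            by_cases hm : PySem.Int.mod (x + y) 8 = 0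
            · rw [if_pos hm, if_pos hm, pySetCell_eq _ _ hx0 hy0, pySetCell_eq _ _ hx0 hy0,
                pySetCell_eq _ _ hx0 hy0, S_collapse]
            · rw [if_neg hm, if_neg hm]
          rw [hbody]
          exact main_pointwise sx sy w h hsx hsyh _ pf
        · have hcol : ∀ x y : Int, ditherColor sy x y = ((0 : Int), (0 : Int), (0 : Int)) := by
            intro x y
            unfold ditherColor
            rw [if_neg (fun hc => c1 hc.1), if_neg (fun hc => c2 hc.1), if_neg (fun hc => c3 hc.1)]
          simp only [hcol]
          have hbody : (PySem.List.pyRange sx (sx + w)).foldl (fun fl x =>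
                (PySem.List.pyRange (sy - h) sy).foldl (fun fl y =>
                  let fl' := pySetCell fl x y (0, 0, 0)
                  if sy > 300 ∧ sy < 320 then
                    if PySem.Int.mod (x + y) 2 = 0 then pySetCell fl' x y (255, 255, 255) else fl'
                  else if 320 ≤ sy ∧ sy < 340 then
                    if PySem.Int.mod (x + y) 4 = 0 then pySetCell fl' x y (255, 255, 255) else fl'
                  else if 340 ≤ sy ∧ sy < 360 then
                    if PySem.Int.mod (x + y) 8 = 0 then pySetCell fl' x y (255, 255, 255) else fl'
                  else fl') fl) pf
              = (PySem.List.pyRange sx (sx + w)).foldl (fun fl x =>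
                  (PySem.List.pyRange (sy - h) sy).foldl (fun fl y =>
                    pySetCell fl x y ((0 : Int), (0 : Int), (0 : Int))) fl) pf := by
            refine PySem.List.foldl_congr_mem _ _ _ _ ?_
            intro acc x _
            refine PySem.List.foldl_congr_mem _ _ _ _ ?_
            intro acc' y _
            simp only [if_neg c1, if_neg c2, if_neg c3]
          rw [hbody]
          exact main_pointwise sx sy w h hsx hsyh _ pf
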